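-- pv_equiv track=rewrite | github.com/SenseTime-FVG/sensenova-claw | sensenova_claw/capabilities/tools/apply_patch_tool.py | seek_sequence
-- ===== SOURCE A (Python) =====
-- from typing import Any, Callable, Literal
--
-- def seek_sequence(
--     lines: list[str],
--     pattern: list[str],
--     start: int,
--     eof: bool,
-- ) -> int | None:
--     if not pattern:
--         return start
--     if len(pattern) > len(lines):
--         return None
--
--     max_start = len(lines) - len(pattern)
--     search_start = max_start if eof and len(lines) >= len(pattern) else start
--     if search_start > max_start:
--         return None
--
--     normalizers: list[Callable[[str], str]] = [
--         lambda value: value,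
--         lambda value: value.rstrip(),
--         lambda value: value.strip(),
--         lambda value: normalize_punctuation(value.strip()),
--     ]
--     for normalize in normalizers:
--         for idx in range(search_start, max_start + 1):
--             if lines_match(lines, pattern, idx, normalize):
--                 return idx
--     return None
--
-- def lines_match(
--     lines: list[str],
--     pattern: list[str],
--     start: int,
--     normalize: Callable[[str], str],
-- ) -> bool:
--     for offset, expected in enumerate(pattern):
--         if normalize(lines[start + offset]) != normalize(expected):
--             return False
--     return True
--
-- def normalize_punctuation(value: str) -> str:
--     table = {
--         "\u2010": "-",
--         "\u2011": "-",
--         "\u2012": "-",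
--         "\u2013": "-",
--         "\u2014": "-",
--         "\u2015": "-",
--         "\u2212": "-",
--         "\u2018": "'",
--         "\u2019": "'",
--         "\u201A": "'",
--         "\u201B": "'",
--         "\u201C": '"',
--         "\u201D": '"',
--         "\u201E": '"',
--         "\u201F": '"',
--         "\u00A0": " ",
--         "\u2002": " ",
--         "\u2003": " ",
--         "\u2004": " ",
--         "\u2005": " ",
--         "\u2006": " ",
--         "\u2007": " ",
--         "\u2008": " ",
--         "\u2009": " ",
--         "\u200A": " ",
--         "\u202F": " ",
--         "\u205F": " ",
--         "\u3000": " ",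
--     }
--     return "".join(table.get(char, char) for char in value)
-- ===== SOURCE B (Python) =====
-- # B: single pass over candidate positions (position-major instead of normalizer-major),
-- # with the four normalized views of lines/pattern precomputed once; keeps the first
-- # position achieving the smallest normalizer level, which equals A's level-major scan order.
--
-- def normalize_punctuation(value: str) -> str:
--     table = {
--         "\u2010": "-", "\u2011": "-", "\u2012": "-", "\u2013": "-",
--         "\u2014": "-", "\u2015": "-", "\u2212": "-",
--         "\u2018": "'", "\u2019": "'", "\u201A": "'", "\u201B": "'",
--         "\u201C": '"', "\u201D": '"', "\u201E": '"', "\u201F": '"',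
--         "\u00A0": " ", "\u2002": " ", "\u2003": " ", "\u2004": " ",
--         "\u2005": " ", "\u2006": " ", "\u2007": " ", "\u2008": " ",
--         "\u2009": " ", "\u200A": " ", "\u202F": " ", "\u205F": " ",
--         "\u3000": " ",
--     }
--     return "".join(table.get(char, char) for char in value)
--
-- def seek_sequence(lines, pattern, start, eof):
--     if not pattern:
--         return start
--     if len(pattern) > len(lines):
--         return None
--     max_start = len(lines) - len(pattern)
--     search_start = max_start if eof else start
--     if search_start > max_start:
--         return None
--     normalizers = [
--         lambda value: value,
--         lambda value: value.rstrip(),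
--         lambda value: value.strip(),
--         lambda value: normalize_punctuation(value.strip()),
--     ]
--     norm_lines = [[f(line) for line in lines] for f in normalizers]
--     norm_pattern = [[f(p) for p in pattern] for f in normalizers]
--     best = None  # lexicographically smallest (level, position)
--     for idx in range(search_start, max_start + 1):
--         for level in range(len(normalizers)):
--             nl = norm_lines[level]
--             np = norm_pattern[level]
--             if all(nl[idx + o] == pe for o, pe in enumerate(np)):
--                 if best is None or level < best[0]:
--                     best = (level, idx)
--                 break
--     return None if best is None else best[1]
-- ===== Notes on version B (the rewrite author's own statement) =====
-- stated objective: alternative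
-- what changed: A sweeps the whole position range once per normalizer (4 level-major passes, re-normalizing every line and pattern element at each window); B precomputes the four normalized views of lines and pattern once and makes a single position-major pass, keeping the first position with the smallest matching normalizer level, which equals A's level-major scan order.
import Mathlib
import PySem

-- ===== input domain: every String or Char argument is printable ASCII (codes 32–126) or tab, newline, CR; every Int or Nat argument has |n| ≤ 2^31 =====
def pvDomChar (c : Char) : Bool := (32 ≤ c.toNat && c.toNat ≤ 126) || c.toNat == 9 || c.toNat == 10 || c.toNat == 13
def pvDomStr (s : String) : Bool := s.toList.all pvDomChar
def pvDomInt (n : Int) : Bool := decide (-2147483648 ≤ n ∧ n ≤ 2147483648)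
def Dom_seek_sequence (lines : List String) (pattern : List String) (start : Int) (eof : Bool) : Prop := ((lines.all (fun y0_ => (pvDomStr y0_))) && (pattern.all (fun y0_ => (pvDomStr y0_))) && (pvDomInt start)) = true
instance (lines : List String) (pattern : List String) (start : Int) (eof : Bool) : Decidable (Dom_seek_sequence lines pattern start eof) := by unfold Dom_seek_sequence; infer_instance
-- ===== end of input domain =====

-- B re-implements A's normalizer-major 4-sweep scan as a single position-major pass over
-- precomputed normalized views, keeping the first position with the smallest matching
-- normalizer level (objective: alternative — a different traversal of the same cost, not claimed faster).

-- ===== PORT A =====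
-- shared leaf helper (identical module-level helper in both Python sources):
-- "".join(table.get(char, char) for char in value) = the string of the mapped characters
def pv_punct_table : PySem.Dict Char Char := PySem.Dict.ofList
  [('\u2010', '-'), ('\u2011', '-'), ('\u2012', '-'), ('\u2013', '-'),
   ('\u2014', '-'), ('\u2015', '-'), ('\u2212', '-'),
   ('\u2018', '\''), ('\u2019', '\''), ('\u201A', '\''), ('\u201B', '\''),
   ('\u201C', '\"'), ('\u201D', '\"'), ('\u201E', '\"'), ('\u201F', '\"'),
   ('\u00A0', ' '), ('\u2002', ' '), ('\u2003', ' '), ('\u2004', ' '),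
   ('\u2005', ' '), ('\u2006', ' '), ('\u2007', ' '), ('\u2008', ' '),
   ('\u2009', ' '), ('\u200A', ' '), ('\u202F', ' '), ('\u205F', ' '),
   ('\u3000', ' ')]

def normalize_punctuation (value : String) : String :=
  String.ofList (value.toList.map (fun c => pv_punct_table.getD c c))

-- the same 4-element normalizer list appears verbatim in both Python sources
def pvNormalizers : List (String → String) :=
  [fun value => value,
   fun value => PySem.Str.rstrip value,
   fun value => PySem.Str.strip value,
   fun value => normalize_punctuation (PySem.Str.strip value)]

def lines_match (lines : List String) (pattern : List String) (start : Int)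
    (normalize : String → String) : Bool :=
  (PySem.List.enumerate pattern 0).all
    (fun oe => ((PySem.List.pyGet? lines (start + oe.1)).map normalize) == some (normalize oe.2))

-- the 'for normalize in normalizers: for idx in range(...): if lines_match: return idx' loops
def seekLevels (norms : List (String → String)) (lines : List String) (pattern : List String)
    (ss : Int) (ms : Int) : Option Int :=
  match norms with
  | [] => none
  | f :: rest =>
    match (PySem.List.pyRange ss (ms + 1) 1).find? (fun idx => lines_match lines pattern idx f) with
    | some idx => some idx
    | none => seekLevels rest lines pattern ss ms

def seek_sequence (lines : List String) (pattern : List String) (start : Int) (eof : Bool) : Option Int :=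
  if pattern = [] then some start
  else if pattern.length > lines.length then none
  else
    let max_start : Int := (lines.length : Int) - (pattern.length : Int)
    let search_start : Int := if eof && decide (lines.length ≥ pattern.length) then max_start else start
    if search_start > max_start then none
    else seekLevels pvNormalizers lines pattern search_start max_start

-- ===== PORT B =====
def seek_sequence_alt (lines : List String) (pattern : List String) (start : Int) (eof : Bool) : Option Int :=
  if pattern = [] then some start
  else if pattern.length > lines.length then none
  else
    let max_start : Int := (lines.length : Int) - (pattern.length : Int)
    let search_start : Int := if eof then max_start else start
    if search_start > max_start then none
    else
      let norm_lines := pvNormalizers.map (fun f => lines.map f)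
      let norm_pattern := pvNormalizers.map (fun f => pattern.map f)
      let best := (PySem.List.pyRange search_start (max_start + 1) 1).foldl
        (fun best idx =>
          match (PySem.List.pyRange 0 (pvNormalizers.length : Int) 1).find?
              (fun level =>
                let nl := PySem.List.pyGetD norm_lines level []
                let np := PySem.List.pyGetD norm_pattern level []
                (PySem.List.enumerate np 0).all
                  (fun ope => (PySem.List.pyGet? nl (idx + ope.1)) == some ope.2)) with
          | none => best
          | some level =>
            match best with
            | none => some (level, idx)
            | some b => if level < b.1 then some (level, idx) else best)
        none
      best.map (fun b => b.2)

-- ===== PRECONDITION & SPEC =====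
-- Pre_ excludes exactly the inputs where the Python A raises IndexError: a nonempty pattern
-- fitting in lines, eof false and start < -len(lines) (the first access lines[start] is out of range).
def Pre_seek_sequence (lines : List String) (pattern : List String) (start : Int) (eof : Bool) : Prop :=
  pattern = [] ∨ lines.length < pattern.length ∨ eof = true ∨ -(lines.length : Int) ≤ start
instance (lines : List String) (pattern : List String) (start : Int) (eof : Bool) : Decidable (Pre_seek_sequence lines pattern start eof) := by unfold Pre_seek_sequence; infer_instance

def pvWitness_seek_sequence : List String × List String × Int × Bool := (["a", "b"], ["b"], 0, false)

def Spec_seek_sequence (lines : List String) (pattern : List String) (start : Int) (eof : Bool) (out : Option Int) : Prop := out = seek_sequence_alt lines pattern start eof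
instance (lines : List String) (pattern : List String) (start : Int) (eof : Bool) (out : Option Int) : Decidable (Spec_seek_sequence lines pattern start eof out) := by unfold Spec_seek_sequence; infer_instance

-- ===== CLAIM (what is proved, stated in full; the proofs are below) =====
def Claim_equal_seek_sequence : Prop := ∀ (lines : List String) (pattern : List String) (start : Int) (eof : Bool), Dom_seek_sequence lines pattern start eof → Pre_seek_sequence lines pattern start eof → Spec_seek_sequence lines pattern start eof (seek_sequence lines pattern start eof)

-- ===== LEMMAS AND PROOFS =====

-- A's nested loops, abstracted: scan predicates (one per normalizer level) in order,
-- return the first hit of the first level that has one.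
def pvAfun (ps : List (Int → Bool)) (R : List Int) : Option Int :=
  match ps with
  | [] => none
  | p :: rest =>
    match R.find? p with
    | some i => some i
    | none => pvAfun rest R

-- the same with the level recorded (levels counted from k)
def pvAwl (ps : List (Int → Bool)) (k : Int) (R : List Int) : Option (Int × Int) :=
  match ps with
  | [] => none
  | p :: rest =>
    match R.find? p with
    | some i => some (k, i)
    | none => pvAwl rest (k + 1) R

-- B's inner loop, abstracted: the first level (counted from k) matching at idx
def pvFirstLvl (ps : List (Int → Bool)) (k : Int) (idx : Int) : Option Int :=
  match ps with
  | [] => none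
  | p :: rest => if p idx then some k else pvFirstLvl rest (k + 1) idx

-- left-biased minimum by level
def pvCombine (x y : Option (Int × Int)) : Option (Int × Int) :=
  match x, y with
  | none, y => y
  | x, none => x
  | some a, some b => if b.1 < a.1 then some b else some a

-- B's accumulator step, abstracted
def pvStep (ps : List (Int → Bool)) (best : Option (Int × Int)) (idx : Int) : Option (Int × Int) :=
  match pvFirstLvl ps 0 idx with
  | none => best
  | some l =>
    match best with
    | none => some (l, idx)
    | some b => if l < b.1 then some (l, idx) else best

theorem pvCombine_none_left (y : Option (Int × Int)) : pvCombine none y = y := by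
  cases y <;> rfl

theorem pvCombine_none_right (x : Option (Int × Int)) : pvCombine x none = x := by
  cases x <;> rfl

theorem pvCombine_assoc (x y z : Option (Int × Int)) :
    pvCombine (pvCombine x y) z = pvCombine x (pvCombine y z) := by
  rcases x with _ | a <;> rcases y with _ | b <;> rcases z with _ | c <;>
    simp only [pvCombine] <;> (try split_ifs) <;> simp only [pvCombine] <;>
    (try split_ifs) <;> first | rfl | omega

theorem pvStep_eq_combine (ps : List (Int → Bool)) (b : Option (Int × Int)) (idx : Int) :
    pvStep ps b idx = pvCombine b ((pvFirstLvl ps 0 idx).map (fun l => (l, idx))) := by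
  cases h : pvFirstLvl ps 0 idx <;> cases b <;> simp [pvStep, pvCombine, h]

theorem pvFoldl_step (ps : List (Int → Bool)) (R : List Int) (b : Option (Int × Int)) :
    R.foldl (pvStep ps) b = pvCombine b (R.foldl (pvStep ps) none) := by
  induction R generalizing b with
  | nil => simp [pvCombine_none_right]
  | cons i R ih =>
    simp only [List.foldl_cons]
    rw [ih (pvStep ps b i), ih (pvStep ps none i), pvStep_eq_combine, pvStep_eq_combine,
      pvCombine_none_left, pvCombine_assoc]

theorem pvAwl_le (ps : List (Int → Bool)) (k : Int) (R : List Int) (b : Int × Int)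
    (h : pvAwl ps k R = some b) : k ≤ b.1 := by
  induction ps generalizing k with
  | nil => simp [pvAwl] at h
  | cons p rest ih =>
    simp only [pvAwl] at h
    cases hf : R.find? p with
    | some i => rw [hf] at h; injection h with h'; rw [← h']
    | none => rw [hf] at h; have := ih (k + 1) h; omega

theorem pvFirstLvl_le (ps : List (Int → Bool)) (k : Int) (idx : Int) (l : Int)
    (h : pvFirstLvl ps k idx = some l) : k ≤ l := by
  induction ps generalizing k with
  | nil => simp [pvFirstLvl] at h
  | cons p rest ih =>
    simp only [pvFirstLvl] at h
    cases hp : p idx with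
    | true => rw [hp] at h; injection h with h'; omega
    | false => rw [hp] at h; have := ih (k + 1) h; omega

theorem pvAwl_nil (ps : List (Int → Bool)) (k : Int) : pvAwl ps k [] = none := by
  induction ps generalizing k with
  | nil => rfl
  | cons p rest ih => simp [pvAwl, ih]

theorem pvAwl_cons (ps : List (Int → Bool)) (k : Int) (idx : Int) (R : List Int) :
    pvAwl ps k (idx :: R) =
      pvCombine ((pvFirstLvl ps k idx).map (fun l => (l, idx))) (pvAwl ps k R) := by
  induction ps generalizing k with
  | nil => rfl
  | cons p rest ih =>
    simp only [pvAwl, pvFirstLvl, List.find?_cons]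
    cases hp : p idx with
    | true =>
      simp only [hp]
      cases hf : R.find? p with
      | some i => simp [hf, pvCombine] <;> (try split_ifs) <;> first | rfl | omega
      | none =>
        cases ha : pvAwl rest (k + 1) R with
        | none => simp [hf, ha, pvCombine]
        | some b =>
          have hk := pvAwl_le rest (k + 1) R b ha
          simp [hf, ha, pvCombine] <;> (try split_ifs) <;> first | rfl | omega
    | false =>
      simp only [hp]
      cases hf : R.find? p with
      | some i =>
        cases hl : pvFirstLvl rest (k + 1) idx with
        | none => simp [hf, hl, pvCombine]
        | some l =>
          have hkl : k + 1 ≤ l := pvFirstLvl_le rest (k + 1) idx l hl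
          simp [hf, hl, pvCombine] <;> (try split_ifs) <;> first | rfl | omega
      | none => simp only [hf]; exact ih (k + 1)

theorem pvFoldl_eq_awl (ps : List (Int → Bool)) (R : List Int) :
    R.foldl (pvStep ps) none = pvAwl ps 0 R := by
  induction R with
  | nil => simp [pvAwl_nil]
  | cons idx R ih =>
    simp only [List.foldl_cons]
    rw [pvFoldl_step, ih, pvStep_eq_combine, pvCombine_none_left, pvAwl_cons]

theorem pvAwl_map_snd (ps : List (Int → Bool)) (k : Int) (R : List Int) :
    (pvAwl ps k R).map (fun b => b.2) = pvAfun ps R := by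
  induction ps generalizing k with
  | nil => rfl
  | cons p rest ih =>
    simp only [pvAwl, pvAfun]
    cases hf : R.find? p with
    | some i => rfl
    | none => exact ih (k + 1)


theorem pvPyGet?_map {α β : Type} (f : α → β) (xs : List α) (j : Int) :
    PySem.List.pyGet? (xs.map f) j = (PySem.List.pyGet? xs j).map f := by
  simp [PySem.List.pyGet?, PySem.List.pyIdx?]

theorem pvEnumerate_map {α β : Type} (f : α → β) (xs : List α) (s : Int) :
    PySem.List.enumerate (xs.map f) s = (PySem.List.enumerate xs s).map (fun p => (p.1, f p.2)) := by
  induction xs generalizing s with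
  | nil => simp [PySem.List.enumerate]
  | cons x xs ih => simp [PySem.List.enumerate_cons, ih]

-- B's window test over the precomputed normalized views is A's lines_match
theorem pvMatch_map (lines pattern : List String) (idx : Int) (f : String → String) :
    ((PySem.List.enumerate (pattern.map f) 0).all
      (fun ope => (PySem.List.pyGet? (lines.map f) (idx + ope.1)) == some ope.2))
    = lines_match lines pattern idx f := by
  unfold lines_match
  rw [pvEnumerate_map, List.all_map]
  simp [Function.comp_def, pvPyGet?_map]

theorem pvGetD4_0 {α : Type} (a b c d e : α) : PySem.List.pyGetD [a,b,c,d] (0:Int) e = a := by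
  simp [pysem]
theorem pvGetD4_1 {α : Type} (a b c d e : α) : PySem.List.pyGetD [a,b,c,d] (1:Int) e = b := by
  simp [pysem]
theorem pvGetD4_2 {α : Type} (a b c d e : α) : PySem.List.pyGetD [a,b,c,d] (2:Int) e = c := by
  simp [pysem]
theorem pvGetD4_3 {α : Type} (a b c d e : α) : PySem.List.pyGetD [a,b,c,d] (3:Int) e = d := by
  simp [pysem]

theorem pvRange4 : PySem.List.pyRange 0 (pvNormalizers.length : Int) 1 = [0,1,2,3] := by
  rw [show (pvNormalizers.length : Int) = 4 from by rfl]
  decide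

-- B's inner level loop is pvFirstLvl on the list of per-level window tests
set_option maxHeartbeats 1000000 in
theorem pvInner_eq (lines pattern : List String) (idx : Int) :
    (PySem.List.pyRange 0 (pvNormalizers.length : Int) 1).find?
      (fun level =>
        let nl := PySem.List.pyGetD (pvNormalizers.map (fun f => lines.map f)) level []
        let np := PySem.List.pyGetD (pvNormalizers.map (fun f => pattern.map f)) level []
        (PySem.List.enumerate np 0).all
          (fun ope => (PySem.List.pyGet? nl (idx + ope.1)) == some ope.2))
    = pvFirstLvl (pvNormalizers.map (fun f => fun i => lines_match lines pattern i f)) 0 idx := by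
  rw [pvRange4]
  simp only [pvNormalizers, List.map_cons, List.map_nil, List.find?_cons, pvFirstLvl,
    pvGetD4_0, pvGetD4_1, pvGetD4_2, pvGetD4_3, pvMatch_map]
  cases hb0 : lines_match lines pattern idx (fun value => value) <;>
    cases hb1 : lines_match lines pattern idx (fun value => PySem.Str.rstrip value) <;>
    cases hb2 : lines_match lines pattern idx (fun value => PySem.Str.strip value) <;>
    cases hb3 : lines_match lines pattern idx (fun value => normalize_punctuation (PySem.Str.strip value)) <;>
    simp [hb0, hb1, hb2, hb3]

-- A's level-major sweep is pvAfun on the same list of per-level window tests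
theorem pvSeekLevels_eq (norms : List (String → String)) (lines pattern : List String)
    (ss ms : Int) :
    seekLevels norms lines pattern ss ms
      = pvAfun (norms.map (fun f => fun i => lines_match lines pattern i f))
          (PySem.List.pyRange ss (ms + 1) 1) := by
  induction norms with
  | nil => rfl
  | cons f rest ih => simp only [seekLevels, pvAfun, List.map_cons]; rw [ih]

-- ===== VERDICT (by name: the statement is the Claim_ definition above) =====
theorem seek_sequence_spec : Claim_equal_seek_sequence := by
  intro lines pattern start eof _hDom _hPre
  unfold Spec_seek_sequence seek_sequence seek_sequence_alt
  by_cases h1 : pattern = []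
  · simp [h1]
  · by_cases h2 : pattern.length > lines.length
    · simp [h1, h2]
    · have hge : decide (lines.length ≥ pattern.length) = true := by
        simp only [decide_eq_true_eq]; omega
      simp only [h1, h2, if_false, hge, Bool.and_true, if_neg]
      set ms : Int := (lines.length : Int) - (pattern.length : Int) with hms
      set ss : Int := if eof = true then ms else start with hss
      by_cases h3 : ss > ms
      · simp [h3]
      · simp only [h3, if_false]
        rw [pvSeekLevels_eq,
          ← pvAwl_map_snd (pvNormalizers.map (fun f => fun i => lines_match lines pattern i f)) 0
            (PySem.List.pyRange ss (ms + 1) 1),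
          ← pvFoldl_eq_awl]
        congr 1
        apply PySem.List.foldl_congr_mem
        intro b i _
        rw [pvStep_eq_combine, ← pvInner_eq lines pattern i]
        cases hf : (PySem.List.pyRange 0 (pvNormalizers.length : Int) 1).find?
            (fun level =>
              let nl := PySem.List.pyGetD (pvNormalizers.map (fun f => lines.map f)) level []
              let np := PySem.List.pyGetD (pvNormalizers.map (fun f => pattern.map f)) level []
              (PySem.List.enumerate np 0).all
                (fun ope => (PySem.List.pyGet? nl (i + ope.1)) == some ope.2)) with
        | none => cases b <;> simp [pvCombine]
        | some l => cases b <;> simp [pvCombine]
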